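-- pv_equiv track=rewrite | github.com/sksmslhy/Java_Lexical_and_Syntax_Analyzer | main.py | isLiteralString
-- ===== SOURCE A (Python) =====
-- LETTER = ['a', 'b', 'c', 'd', 'e', 'f', 'g', 'h', 'i', 'j', 'k', 'l', 'm', 'n', 'o', 'p', 'q', 'r', 's', 't', 'u', 'v', 'w', 'x', 'y', 'z',
--             'A', 'B', 'C', 'D', 'E', 'F', 'G', 'H', 'I', 'J', 'K', 'L', 'M', 'N', 'O', 'P', 'Q', 'R', 'S', 'T', 'U', 'V', 'W', 'X', 'Y', 'Z']
--
-- ZERO = ['0']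
--
-- NON_ZERO = ['1','2','3','4','5','6','7','8','9']
--
-- DOUBLE_QUOTE = ['"']
--
-- WHITE_SPACE = [' ', '\t', '\n']
--
-- def isLiteralString(token) :
--     state = ['T0', 'T1', 'T2', 'T3', 'T4', 'T5', 'T6']
--     locate = state[0]
--     for value in token:
--         if locate == state[0]:
--             if value in DOUBLE_QUOTE :
--                 locate = state[1]
--             else : return False
--         elif locate == state[1] :
--             if value in ZERO :
--                 locate = state[2]
--             elif value in NON_ZERO :
--                 locate = state[3]
--             elif value in LETTER :
--                 locate = state[4]
--             elif value in WHITE_SPACE :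
--                 locate = state[5]
--             else : return False
--         elif locate == state[2] :
--             if value in ZERO :
--                 locate = state[2]
--             elif value in NON_ZERO :
--                 locate = state[3]
--             elif value in LETTER :
--                 locate = state[4]
--             elif value in WHITE_SPACE :
--                 locate = state[5]
--             elif value in DOUBLE_QUOTE :
--                 locate = state[6]
--             else : return False
--         elif locate == state[3] :
--             if value in ZERO :
--                 locate = state[2]
--             elif value in NON_ZERO :
--                 locate = state[3]
--             elif value in LETTER :
--                 locate = state[4]
--             elif value in WHITE_SPACE :
--                 locate = state[5]
--             elif value in DOUBLE_QUOTE :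
--                 locate = state[6]
--             else : return False
--         elif locate == state[4] :
--             if value in ZERO :
--                 locate = state[2]
--             elif value in NON_ZERO :
--                 locate = state[3]
--             elif value in LETTER :
--                 locate = state[4]
--             elif value in WHITE_SPACE :
--                 locate = state[5]
--             elif value in DOUBLE_QUOTE :
--                 locate = state[6]
--             else : return False
--         elif locate == state[5] :
--             if value in ZERO :
--                 locate = state[2]
--             elif value in NON_ZERO :
--                 locate = state[3]
--             elif value in LETTER :
--                 locate = state[4]
--             elif value in WHITE_SPACE :
--                 locate = state[5]
--             elif value in DOUBLE_QUOTE :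
--                 locate = state[6]
--             else : return False
--         else : return False
--     if locate == state[6]:
--         return True
--     else:
--         return False
-- ===== SOURCE B (Python) =====
-- ALLOWED = set('0123456789'
--               'abcdefghijklmnopqrstuvwxyzABCDEFGHIJKLMNOPQRSTUVWXYZ'
--               ' \t\n')
--
-- def isLiteralString(token):
--     chars = list(token)
--     if len(chars) < 3 or chars[0] != '"' or chars[-1] != '"':
--         return False
--     return all(c in ALLOWED for c in chars[1:-1])
-- ===== Notes on version B (the rewrite author's own statement) =====
-- stated objective: simpler
-- what changed: Replaced the explicit 7-state DFA loop with a boundary check (length >= 3, first and last char are '"') plus a single membership scan of the interior characters against one allowed set.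
import Mathlib
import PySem

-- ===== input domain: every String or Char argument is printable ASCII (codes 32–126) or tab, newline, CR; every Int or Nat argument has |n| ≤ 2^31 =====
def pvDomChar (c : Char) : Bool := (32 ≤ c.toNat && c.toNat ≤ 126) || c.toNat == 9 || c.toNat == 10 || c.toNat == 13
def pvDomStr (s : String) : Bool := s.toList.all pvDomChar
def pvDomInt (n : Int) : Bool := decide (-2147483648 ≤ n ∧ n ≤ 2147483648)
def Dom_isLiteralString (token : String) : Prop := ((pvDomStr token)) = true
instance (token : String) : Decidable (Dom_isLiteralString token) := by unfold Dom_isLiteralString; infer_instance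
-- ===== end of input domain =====

-- B replaces A's 7-state DFA by a boundary check plus one membership scan of the interior (objective: simpler).

-- ===== PORT A =====
def LETTER : List Char := ['a','b','c','d','e','f','g','h','i','j','k','l','m','n','o','p','q','r','s','t','u','v','w','x','y','z','A','B','C','D','E','F','G','H','I','J','K','L','M','N','O','P','Q','R','S','T','U','V','W','X','Y','Z']
def ZERO : List Char := ['0']
def NON_ZERO : List Char := ['1','2','3','4','5','6','7','8','9']
def DOUBLE_QUOTE : List Char := ['"']
def WHITE_SPACE : List Char := [' ','\t','\n']

-- the for-loop of A, with 'locate' as the index into its state list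
def isLSLoop (token : List Char) (locate : Nat) : Bool :=
  match token with
  | [] => locate == 6
  | v :: rest =>
    if locate == 0 then
      if DOUBLE_QUOTE.contains v then isLSLoop rest 1 else false
    else if locate == 1 then
      if ZERO.contains v then isLSLoop rest 2
      else if NON_ZERO.contains v then isLSLoop rest 3
      else if LETTER.contains v then isLSLoop rest 4
      else if WHITE_SPACE.contains v then isLSLoop rest 5
      else false
    else if locate == 2 then
      if ZERO.contains v then isLSLoop rest 2
      else if NON_ZERO.contains v then isLSLoop rest 3
      else if LETTER.contains v then isLSLoop rest 4
      else if WHITE_SPACE.contains v then isLSLoop rest 5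
      else if DOUBLE_QUOTE.contains v then isLSLoop rest 6
      else false
    else if locate == 3 then
      if ZERO.contains v then isLSLoop rest 2
      else if NON_ZERO.contains v then isLSLoop rest 3
      else if LETTER.contains v then isLSLoop rest 4
      else if WHITE_SPACE.contains v then isLSLoop rest 5
      else if DOUBLE_QUOTE.contains v then isLSLoop rest 6
      else false
    else if locate == 4 then
      if ZERO.contains v then isLSLoop rest 2
      else if NON_ZERO.contains v then isLSLoop rest 3
      else if LETTER.contains v then isLSLoop rest 4
      else if WHITE_SPACE.contains v then isLSLoop rest 5
      else if DOUBLE_QUOTE.contains v then isLSLoop rest 6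
      else false
    else if locate == 5 then
      if ZERO.contains v then isLSLoop rest 2
      else if NON_ZERO.contains v then isLSLoop rest 3
      else if LETTER.contains v then isLSLoop rest 4
      else if WHITE_SPACE.contains v then isLSLoop rest 5
      else if DOUBLE_QUOTE.contains v then isLSLoop rest 6
      else false
    else false

def isLiteralString (token : String) : Bool := isLSLoop token.toList 0

-- ===== PORT B =====
def ALLOWED : PySem.Set Char :=
  PySem.Set.ofList ("0123456789abcdefghijklmnopqrstuvwxyzABCDEFGHIJKLMNOPQRSTUVWXYZ \t\n".toList)

def isLiteralString_alt (token : String) : Bool :=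
  let chars := token.toList
  if chars.length < 3 ∨ PySem.List.pyGet? chars 0 ≠ some '"' ∨ PySem.List.pyGet? chars (-1) ≠ some '"' then
    false
  else
    (PySem.List.slice chars (some 1) (some (-1))).all (fun c => ALLOWED.contains c)

-- ===== PRECONDITION & SPEC =====
def Spec_isLiteralString (token : String) (out : Bool) : Prop := out = isLiteralString_alt token
instance (token : String) (out : Bool) : Decidable (Spec_isLiteralString token out) := by unfold Spec_isLiteralString; infer_instance

-- ===== CLAIM (what is proved, stated in full; the proofs are below) =====
def Claim_equal_isLiteralString : Prop := ∀ (token : String), Dom_isLiteralString token → Spec_isLiteralString token (isLiteralString token)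

-- ===== LEMMAS AND PROOFS =====

-- the union of A's accepting character classes
def isAllowedA (c : Char) : Bool :=
  ZERO.contains c || NON_ZERO.contains c || LETTER.contains c || WHITE_SPACE.contains c

set_option maxRecDepth 4000 in
theorem allowed_eq (c : Char) : ALLOWED.contains c = isAllowedA c := by
  have h : ALLOWED = ZERO ++ NON_ZERO ++ LETTER ++ WHITE_SPACE := by decide
  rw [h]
  simp [isAllowedA, List.mem_append, Bool.or_assoc]

theorem allowed_eq' (c : Char) : decide (c ∈ ALLOWED) = isAllowedA c := by
  rw [← allowed_eq]; simp [List.contains_eq_mem]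

theorem quote_not_allowed : isAllowedA '"' = false := by decide

-- B's slice chars[1:-1] in drop/take form
theorem slice_one_neg_one (l : List Char) :
    PySem.List.slice l (some 1) (some (-1)) = l.tail.dropLast := by
  simp [PySem.List.slice, PySem.List.clampIdx]
  rcases l with _ | ⟨a, t⟩
  · simp
  · simp [List.dropLast_eq_take]

-- acceptance from state 6: only the empty remainder is accepted
theorem loop6 (l : List Char) : isLSLoop l 6 = l.isEmpty := by
  cases l <;> simp [isLSLoop]

-- the specification of states 2–5 (all four have identical transitions)
def specMid (l : List Char) : Bool :=
  (l.getLast? == some '"') && l.dropLast.all isAllowedA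

theorem specMid_cons_allowed (c : Char) (l : List Char) (h : isAllowedA c = true) :
    specMid (c :: l) = specMid l := by
  cases l with
  | nil =>
    have : c ≠ '"' := by rintro rfl; simp [quote_not_allowed] at h
    simp [specMid, this]
  | cons d t => simp [specMid, h]

theorem specMid_cons_quote (l : List Char) : specMid ('"' :: l) = l.isEmpty := by
  cases l with
  | nil => simp [specMid]
  | cons d t => simp [specMid, quote_not_allowed]

theorem specMid_cons_bad (c : Char) (l : List Char)
    (h : isAllowedA c = false) (hq : c ≠ '"') : specMid (c :: l) = false := by
  cases l with
  | nil => simp [specMid, hq]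
  | cons d t => simp [specMid, h]

theorem loopMid (l : List Char) :
    isLSLoop l 2 = specMid l ∧ isLSLoop l 3 = specMid l ∧
    isLSLoop l 4 = specMid l ∧ isLSLoop l 5 = specMid l := by
  induction l with
  | nil => simp [isLSLoop, specMid]
  | cons c rest ih =>
    obtain ⟨ih2, ih3, ih4, ih5⟩ := ih
    by_cases hz : c ∈ ZERO
    · have ha : isAllowedA c = true := by simp [isAllowedA]; tauto
      simp [isLSLoop, hz, ih2, specMid_cons_allowed c rest ha]
    · by_cases hn : c ∈ NON_ZERO
      · have ha : isAllowedA c = true := by simp [isAllowedA]; tauto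
        simp [isLSLoop, hz, hn, ih3, specMid_cons_allowed c rest ha]
      · by_cases hl : c ∈ LETTER
        · have ha : isAllowedA c = true := by simp [isAllowedA]; tauto
          simp [isLSLoop, hz, hn, hl, ih4, specMid_cons_allowed c rest ha]
        · by_cases hw : c ∈ WHITE_SPACE
          · have ha : isAllowedA c = true := by simp [isAllowedA]; tauto
            simp [isLSLoop, hz, hn, hl, hw, ih5, specMid_cons_allowed c rest ha]
          · by_cases hq : c ∈ DOUBLE_QUOTE
            · have hc : c = '"' := by simpa [DOUBLE_QUOTE] using hq
              subst hc
              simp [isLSLoop, ZERO, NON_ZERO, LETTER, WHITE_SPACE, DOUBLE_QUOTE,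
                loop6, specMid_cons_quote]
            · have ha : isAllowedA c = false := by
                simp [isAllowedA, hz, hn, hl, hw]
              have hq' : c ≠ '"' := by
                rintro rfl; simp [DOUBLE_QUOTE] at hq
              simp [isLSLoop, hz, hn, hl, hw, hq, specMid_cons_bad c rest ha hq']

theorem loop1 (l : List Char) :
    isLSLoop l 1 = match l with
      | [] => false
      | c :: rest => isAllowedA c && specMid rest := by
  cases l with
  | nil => simp [isLSLoop]
  | cons c rest =>
    by_cases hz : c ∈ ZERO
    · have ha : isAllowedA c = true := by simp [isAllowedA]; tauto
      simp [isLSLoop, hz, (loopMid rest).1, ha]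
    · by_cases hn : c ∈ NON_ZERO
      · have ha : isAllowedA c = true := by simp [isAllowedA]; tauto
        simp [isLSLoop, hz, hn, (loopMid rest).2.1, ha]
      · by_cases hl : c ∈ LETTER
        · have ha : isAllowedA c = true := by simp [isAllowedA]; tauto
          simp [isLSLoop, hz, hn, hl, (loopMid rest).2.2.1, ha]
        · by_cases hw : c ∈ WHITE_SPACE
          · have ha : isAllowedA c = true := by simp [isAllowedA]; tauto
            simp [isLSLoop, hz, hn, hl, hw, (loopMid rest).2.2.2, ha]
          · have ha : isAllowedA c = false := by
              simp [isAllowedA, hz, hn, hl, hw]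
            simp [isLSLoop, hz, hn, hl, hw, ha]

theorem loop0_quote (l : List Char) : isLSLoop ('"' :: l) 0 = isLSLoop l 1 := by
  simp [isLSLoop, DOUBLE_QUOTE]

-- ===== VERDICT (by name: the statement is the Claim_ definition above) =====
theorem isLiteralString_spec : Claim_equal_isLiteralString := by
  intro token _
  unfold Spec_isLiteralString
  unfold isLiteralString isLiteralString_alt
  cases htl : token.toList with
  | nil => simp [isLSLoop]
  | cons c rest =>
    by_cases hc : c = '"'
    · subst hc
      rw [loop0_quote, loop1]
      cases rest with
      | nil => simp
      | cons d t =>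
        cases ht : t using List.reverseRecOn with
        | nil =>
          -- token = ['"', d]: too short on B's side, specMid [] = false on A's side
          simp [specMid]
        | append_singleton t' e =>
          by_cases he : e = '"'
          · subst he
            simp [specMid, PySem.List.pyGet?_zero_cons, PySem.List.pyGet?_neg_one,
              slice_one_neg_one]
            have h1 : (d :: (t' ++ ['"'])).getLast? = some '"' := by
              rw [← List.cons_append]; exact List.getLast?_concat
            have h2 : (d :: (t' ++ ['"'])).dropLast = d :: t' := by
              rw [← List.cons_append]; exact List.dropLast_concat ..
            have h3 : ¬ (t'.length + 1 + 1 + 1 < 3) := by omega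
            simp [h1, h2, h3, allowed_eq']
          · simp [specMid, PySem.List.pyGet?_zero_cons, PySem.List.pyGet?_neg_one,
              slice_one_neg_one]
            have h1 : (d :: (t' ++ [e])).getLast? = some e := by
              rw [← List.cons_append]; exact List.getLast?_concat
            simp [h1, he]
    · simp [isLSLoop, DOUBLE_QUOTE, hc]
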